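-- pv_equiv track=rewrite | github.com/liyuneh/Leetcode_tracker | 4295-count-indices-with-opposite-parity/count-indices-with-opposite-parity.py | countOppositeParity
-- ===== SOURCE A (Python) =====
-- def countOppositeParity(nums: list[int]) -> list[int]:
--     ans = []
--
--     for i in range(len(nums)):
--         count = 0
--         for j in range(i + 1, len(nums)):
--             if nums[i] % 2 != nums[j] % 2:
--                 count += 1
--         ans.append(count)
--     return ans
-- ===== SOURCE B (Python) =====
-- def countOppositeParity(nums: list[int]) -> list[int]:
--     even = 0
--     odd = 0
--     res = []
--     for x in reversed(nums):
--         if x % 2 == 0: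
--             res.append(odd)
--             even += 1
--         else:
--             res.append(even)
--             odd += 1
--     res.reverse()
--     return res
-- ===== Notes on version B (the rewrite author's own statement) =====
-- stated objective: faster
-- what changed: Replaced the quadratic nested index scan with a single backward pass that maintains suffix counts of even and odd elements.
import Mathlib
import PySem

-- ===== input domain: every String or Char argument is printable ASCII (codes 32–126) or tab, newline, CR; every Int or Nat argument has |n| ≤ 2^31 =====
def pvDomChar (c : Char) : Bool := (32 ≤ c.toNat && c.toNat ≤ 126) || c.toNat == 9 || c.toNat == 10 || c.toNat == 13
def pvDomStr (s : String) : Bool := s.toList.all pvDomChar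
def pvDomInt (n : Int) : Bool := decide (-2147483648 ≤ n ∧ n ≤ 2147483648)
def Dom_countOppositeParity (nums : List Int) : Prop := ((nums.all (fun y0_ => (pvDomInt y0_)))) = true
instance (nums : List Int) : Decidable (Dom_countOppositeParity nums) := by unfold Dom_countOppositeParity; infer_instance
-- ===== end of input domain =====

-- B replaces A's quadratic nested index scan by one backward pass keeping suffix counts of even/odd elements (objective: faster, asymptotic).

-- ===== PORT A =====
def countOppositeParity (nums : List Int) : List Int :=
  (PySem.List.pyRange 0 (PySem.List.len nums) 1).foldl (fun ans i =>
    ans ++ [(PySem.List.pyRange (i + 1) (PySem.List.len nums) 1).foldl (fun count j =>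
      if PySem.Int.mod (PySem.List.pyGetD nums i 0) 2 ≠ PySem.Int.mod (PySem.List.pyGetD nums j 0) 2
      then count + 1 else count) 0]) []

-- ===== PORT B =====
def countOppositeParity_alt (nums : List Int) : List Int :=
  -- state (even, odd, res); loop over reversed(nums); final res.reverse()
  let s := nums.reverse.foldl (fun (s : Int × Int × List Int) x =>
    if x % 2 = 0 then (s.1 + 1, s.2.1, s.2.2 ++ [s.2.1])
    else (s.1, s.2.1 + 1, s.2.2 ++ [s.1])) (0, 0, [])
  s.2.2.reverse

-- ===== PRECONDITION & SPEC =====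
def Spec_countOppositeParity (nums : List Int) (out : List Int) : Prop := out = countOppositeParity_alt nums
instance (nums : List Int) (out : List Int) : Decidable (Spec_countOppositeParity nums out) := by unfold Spec_countOppositeParity; infer_instance

-- ===== CLAIM (what is proved, stated in full; the proofs are below) =====
def Claim_equal_countOppositeParity : Prop := ∀ (nums : List Int), Dom_countOppositeParity nums → Spec_countOppositeParity nums (countOppositeParity nums)

-- ===== LEMMAS AND PROOFS =====

/-- the common value of both programs: for each element, the opposite-parity count in its tail -/
def pvSpec : List Int → List Int
  | [] => []
  | x :: rest =>
    (if x % 2 = 0 then ((rest.countP (fun y => decide (¬ y % 2 = 0)) : Nat) : Int)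
     else ((rest.countP (fun y => decide (y % 2 = 0)) : Nat) : Int)) :: pvSpec rest

lemma B_inv (l : List Int) :
    l.foldr (fun x (s : Int × Int × List Int) =>
      if x % 2 = 0 then (s.1 + 1, s.2.1, s.2.2 ++ [s.2.1])
      else (s.1, s.2.1 + 1, s.2.2 ++ [s.1])) (0, 0, []) =
    ((l.countP (fun y => decide (y % 2 = 0)) : Int),
     (l.countP (fun y => decide (¬ y % 2 = 0)) : Int),
     (pvSpec l).reverse) := by
  induction l with
  | nil => simp [pvSpec]
  | cons x rest ih =>
    simp only [List.foldr_cons, ih, pvSpec]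
    by_cases h : x % 2 = 0
    · simp [h, List.countP_cons]
    · simp [h, List.countP_cons]
      omega

lemma B_eq_pvSpec (nums : List Int) : countOppositeParity_alt nums = pvSpec nums := by
  unfold countOppositeParity_alt
  rw [List.foldl_reverse, B_inv]
  simp

lemma pymod2 (a : Int) : PySem.Int.mod a 2 = a % 2 := by simp

def gA (l : List Int) (k : Nat) : Int :=
  ((l.drop (k + 1)).countP (fun y => decide (¬ PySem.Int.mod (l.getD k 0) 2 = PySem.Int.mod y 2)) : Int)

lemma A_eq_map (nums : List Int) :
    countOppositeParity nums = (List.range nums.length).map (gA nums) := by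
  unfold countOppositeParity
  rw [PySem.List.foldl_append_singleton_eq_map]
  rw [PySem.List.len_eq, PySem.List.pyRange_zero_nat]
  rw [List.map_map]
  refine List.map_congr_left ?_
  intro k hk
  rw [List.mem_range] at hk
  simp only [Function.comp]
  rw [show ((k : Int) + 1) = ((k + 1 : Nat) : Int) by push_cast; ring]
  rw [PySem.List.foldl_pyRange_pyGetD' nums 0
    (fun count y => if PySem.Int.mod (PySem.List.pyGetD nums (k : Int) 0) 2 ≠ PySem.Int.mod y 2
      then count + 1 else count) 0 (by positivity)]
  rw [PySem.List.foldl_ite_add_one]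
  simp [gA, PySem.List.pyGetD_natCast]

lemma map_gA (l : List Int) : (List.range l.length).map (gA l) = pvSpec l := by
  induction l with
  | nil => simp [pvSpec]
  | cons x rest ih =>
    rw [List.length_cons, List.range_succ_eq_map, List.map_cons, List.map_map]
    have htail : (List.range rest.length).map (gA (x :: rest) ∘ Nat.succ) =
        (List.range rest.length).map (gA rest) := by
      refine List.map_congr_left ?_
      intro k hk
      simp [gA, Nat.succ_eq_add_one]
    rw [htail, ih]
    have hhead : gA (x :: rest) 0 =
        (if x % 2 = 0 then ((rest.countP (fun y => decide (¬ y % 2 = 0)) : Nat) : Int)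
         else ((rest.countP (fun y => decide (y % 2 = 0)) : Nat) : Int)) := by
      unfold gA
      simp only [List.getD_cons_zero, Nat.zero_add, List.drop_succ_cons, List.drop_zero]
      by_cases h : x % 2 = 0
      · rw [if_pos h]
        congr 1
        refine List.countP_congr ?_
        intro y _
        simp only [pymod2, h, decide_eq_true_eq]
        omega
      · rw [if_neg h]
        congr 1
        refine List.countP_congr ?_
        intro y _
        have hx : x % 2 = 1 := by omega
        simp only [pymod2, hx, decide_eq_true_eq]
        omega
    rw [hhead]
    rfl

-- ===== VERDICT (by name: the statement is the Claim_ definition above) =====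
theorem countOppositeParity_spec : Claim_equal_countOppositeParity := by
  intro nums _
  unfold Spec_countOppositeParity
  rw [A_eq_map, map_gA, B_eq_pvSpec]
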